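-- pv_equiv track=rewrite | github.com/kotyaTOP/python | Chel_me_please/code.py | get_sequence
-- ===== SOURCE A (Python) =====
-- def get_sequence(curve):
--     sequence = []
--     region = []
--     desc = True if curve[1] < curve[0] else False
--     for i in range(len(curve) - 1):
--         region.append(curve[i])
--         if desc:
--             if curve[i + 1] > curve[i]:
--                 sequence.append(region)
--                 region = []
--                 desc = False
--                 continue
--         else:
--             if curve[i + 1] < curve[i]:
--                 sequence.append(region)
--                 region = []
--                 desc = True
--                 continue
--     return sequence
-- ===== SOURCE B (Python) =====
-- def get_sequence(curve):
--     # pass 1: record break indices, flipping the running direction at each break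
--     desc = curve[1] < curve[0]
--     breaks = []
--     for i in range(len(curve) - 1):
--         if (curve[i + 1] > curve[i]) if desc else (curve[i + 1] < curve[i]):
--             breaks.append(i)
--             desc = not desc
--     # pass 2: slice the curve between consecutive break boundaries
--     out = []
--     start = 0
--     for i in breaks:
--         out.append(curve[start:i + 1])
--         start = i + 1
--     return out
-- ===== Notes on version B (the rewrite author's own statement) =====
-- stated objective: alternative
-- what changed: Replaces A's single loop that accumulates a growing region list and emits it on each direction break by two passes: one that only records break indices while flipping a running direction, and one that slices the curve between consecutive break boundaries.
import Mathlib
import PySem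

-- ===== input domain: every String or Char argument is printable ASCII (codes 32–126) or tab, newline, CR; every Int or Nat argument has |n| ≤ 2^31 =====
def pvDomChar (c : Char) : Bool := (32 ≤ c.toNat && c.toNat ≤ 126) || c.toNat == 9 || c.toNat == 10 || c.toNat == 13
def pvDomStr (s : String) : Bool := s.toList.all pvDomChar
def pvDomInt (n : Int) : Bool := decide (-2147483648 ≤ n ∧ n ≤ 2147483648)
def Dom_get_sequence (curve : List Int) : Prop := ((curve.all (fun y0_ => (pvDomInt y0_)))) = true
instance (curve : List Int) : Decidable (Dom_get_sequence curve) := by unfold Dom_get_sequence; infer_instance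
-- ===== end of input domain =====

-- B changes the decomposition: two passes (record break indices, then slice between
-- break boundaries) instead of A's single loop carrying a growing region accumulator.

-- ===== PORT A =====
-- A's for-loop over range(len(curve)-1) with state (sequence, region, desc);
-- indices i and i+1 are always in range (i < len-1), so getD is exact here.
def gsLoopA (curve : List Int) (n i : Nat) (desc : Bool)
    (region : List Int) (seq : List (List Int)) : List (List Int) :=
  if _h : i < n then
    let region' := region ++ [curve.getD i 0]
    if desc then
      if curve.getD (i + 1) 0 > curve.getD i 0 then
        gsLoopA curve n (i + 1) false [] (seq ++ [region'])
      else
        gsLoopA curve n (i + 1) desc region' seq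
    else
      if curve.getD (i + 1) 0 < curve.getD i 0 then
        gsLoopA curve n (i + 1) true [] (seq ++ [region'])
      else
        gsLoopA curve n (i + 1) desc region' seq
  else seq
termination_by n - i

def get_sequence (curve : List Int) : List (List Int) :=
  -- curve[1] < curve[0]: in range by Pre_ (length ≥ 2), so getD is exact
  let desc := curve.getD 1 0 < curve.getD 0 0
  gsLoopA curve (curve.length - 1) 0 desc [] []

-- ===== PORT B =====
-- pass 1: break indices, flipping the running direction at each recorded break
def gsBreaks (curve : List Int) (n i : Nat) (desc : Bool) (acc : List Nat) : List Nat :=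
  if _h : i < n then
    if (if desc then curve.getD (i + 1) 0 > curve.getD i 0
        else curve.getD (i + 1) 0 < curve.getD i 0) then
      gsBreaks curve n (i + 1) (!desc) (acc ++ [i])
    else
      gsBreaks curve n (i + 1) desc acc
  else acc
termination_by n - i

-- pass 2: curve[start:i+1] for each break i, then start = i+1
def gsSlices (curve : List Int) (start : Nat) : List Nat → List (List Int)
  | [] => []
  | i :: rest =>
      PySem.List.slice curve (some (start : Int)) (some ((i : Int) + 1)) :: gsSlices curve (i + 1) rest

def get_sequence_alt (curve : List Int) : List (List Int) :=
  let desc := curve.getD 1 0 < curve.getD 0 0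
  gsSlices curve 0 (gsBreaks curve (curve.length - 1) 0 desc [])

-- ===== PRECONDITION & SPEC =====
-- Pre_ excludes curves of length < 2, on which A (and B) raise IndexError at curve[1].
def Pre_get_sequence (curve : List Int) : Prop := 2 ≤ curve.length
instance (curve : List Int) : Decidable (Pre_get_sequence curve) := by
  unfold Pre_get_sequence; infer_instance
def pvWitness_get_sequence : List Int := [1, 2]

def Spec_get_sequence (curve : List Int) (out : List (List Int)) : Prop := out = get_sequence_alt curve
instance (curve : List Int) (out : List (List Int)) : Decidable (Spec_get_sequence curve out) := by unfold Spec_get_sequence; infer_instance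

-- ===== CLAIM (what is proved, stated in full; the proofs are below) =====
def Claim_equal_get_sequence : Prop := ∀ (curve : List Int), Dom_get_sequence curve → Pre_get_sequence curve → Spec_get_sequence curve (get_sequence curve)

-- ===== LEMMAS AND PROOFS =====

-- one-step unfolding lemmas for the two loops, split by the direction flag
theorem gsBreaks_stop (curve : List Int) (n i : Nat) (desc : Bool) (acc : List Nat)
    (hn : ¬ i < n) : gsBreaks curve n i desc acc = acc := by
  rw [gsBreaks]; simp [hn]

theorem gsBreaks_step_true (curve : List Int) (n i : Nat) (acc : List Nat) (hn : i < n) :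
    gsBreaks curve n i true acc =
      if curve.getD (i + 1) 0 > curve.getD i 0 then gsBreaks curve n (i + 1) false (acc ++ [i])
      else gsBreaks curve n (i + 1) true acc := by
  rw [gsBreaks]; simp [hn]

theorem gsBreaks_step_false (curve : List Int) (n i : Nat) (acc : List Nat) (hn : i < n) :
    gsBreaks curve n i false acc =
      if curve.getD (i + 1) 0 < curve.getD i 0 then gsBreaks curve n (i + 1) true (acc ++ [i])
      else gsBreaks curve n (i + 1) false acc := by
  rw [gsBreaks]; simp [hn]

theorem gsLoopA_stop (curve : List Int) (n i : Nat) (desc : Bool) (region : List Int)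
    (seq : List (List Int)) (hn : ¬ i < n) : gsLoopA curve n i desc region seq = seq := by
  rw [gsLoopA]; simp [hn]

theorem gsLoopA_step_true (curve : List Int) (n i : Nat) (region : List Int)
    (seq : List (List Int)) (hn : i < n) :
    gsLoopA curve n i true region seq =
      if curve.getD (i + 1) 0 > curve.getD i 0 then
        gsLoopA curve n (i + 1) false [] (seq ++ [region ++ [curve.getD i 0]])
      else gsLoopA curve n (i + 1) true (region ++ [curve.getD i 0]) seq := by
  rw [gsLoopA]; simp [hn]

theorem gsLoopA_step_false (curve : List Int) (n i : Nat) (region : List Int)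
    (seq : List (List Int)) (hn : i < n) :
    gsLoopA curve n i false region seq =
      if curve.getD (i + 1) 0 < curve.getD i 0 then
        gsLoopA curve n (i + 1) true [] (seq ++ [region ++ [curve.getD i 0]])
      else gsLoopA curve n (i + 1) false (region ++ [curve.getD i 0]) seq := by
  rw [gsLoopA]; simp [hn]

-- gsBreaks only ever appends to its accumulator
theorem gsBreaks_acc (curve : List Int) (n : Nat) :
    ∀ (k i : Nat) (desc : Bool) (acc : List Nat), n - i ≤ k →
    gsBreaks curve n i desc acc = acc ++ gsBreaks curve n i desc [] := by
  intro k
  induction k with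
  | zero =>
      intro i desc acc h
      have hn : ¬ i < n := by omega
      rw [gsBreaks_stop curve n i desc acc hn, gsBreaks_stop curve n i desc [] hn]
      simp
  | succ k ih =>
      intro i desc acc h
      by_cases hn : i < n
      · cases desc with
        | true =>
            rw [gsBreaks_step_true curve n i acc hn, gsBreaks_step_true curve n i [] hn]
            by_cases hc : curve.getD (i + 1) 0 > curve.getD i 0
            · rw [if_pos hc, if_pos hc,
                ih (i + 1) false (acc ++ [i]) (by omega), ih (i + 1) false ([] ++ [i]) (by omega)]
              simp
            · rw [if_neg hc, if_neg hc, ih (i + 1) true acc (by omega)]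
        | false =>
            rw [gsBreaks_step_false curve n i acc hn, gsBreaks_step_false curve n i [] hn]
            by_cases hc : curve.getD (i + 1) 0 < curve.getD i 0
            · rw [if_pos hc, if_pos hc,
                ih (i + 1) true (acc ++ [i]) (by omega), ih (i + 1) true ([] ++ [i]) (by omega)]
              simp
            · rw [if_neg hc, if_neg hc, ih (i + 1) false acc (by omega)]
      · rw [gsBreaks_stop curve n i desc acc hn, gsBreaks_stop curve n i desc [] hn]
        simp

-- Python slice with Nat bounds
theorem slice_nat (curve : List Int) (a b : Nat) :
    PySem.List.slice curve (some (a : Int)) (some ((b : Int) + 1)) = (curve.drop a).take (b + 1 - a) := by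
  have h : ((b : Int) + 1) = ((b + 1 : Nat) : Int) := by push_cast; ring
  rw [h, PySem.List.slice_natCast]

-- the region A is carrying at step i, having last emitted at boundary `start`
def gsRegion (curve : List Int) (start i : Nat) : List Int := (curve.drop start).take (i - start)

theorem gsRegion_snoc (curve : List Int) (start i : Nat) (hs : start ≤ i) (hi : i < curve.length) :
    gsRegion curve start i ++ [curve.getD i 0] = gsRegion curve start (i + 1) := by
  unfold gsRegion
  have h2 : i + 1 - start = (i - start) + 1 := by omega
  rw [h2, List.take_add_one]
  have hg : (curve.drop start)[i - start]? = some (curve.getD i 0) := by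
    rw [List.getElem?_drop]
    have hsi : start + (i - start) = i := by omega
    rw [hsi, List.getElem?_eq_getElem hi]
    simp [List.getD, List.getElem?_eq_getElem hi]
  simp [hg]

theorem gsRegion_nil (curve : List Int) (j : Nat) : gsRegion curve j j = [] := by
  simp [gsRegion]

-- main invariant: A's loop from a region that is curve[start:i] equals seq ++ B's slices of B's breaks
theorem loopA_eq (curve : List Int) (n : Nat) (hn : n ≤ curve.length) :
    ∀ (k i : Nat) (desc : Bool) (start : Nat) (seq : List (List Int)), n - i ≤ k → start ≤ i →
    gsLoopA curve n i desc (gsRegion curve start i) seq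
      = seq ++ gsSlices curve start (gsBreaks curve n i desc []) := by
  intro k
  induction k with
  | zero =>
      intro i desc start seq h hs
      have hi : ¬ i < n := by omega
      rw [gsLoopA_stop curve n i desc _ seq hi, gsBreaks_stop curve n i desc [] hi]
      simp [gsSlices]
  | succ k ih =>
      intro i desc start seq h hs
      by_cases hi : i < n
      · have hil : i < curve.length := by omega
        have hr : gsRegion curve start i ++ [curve.getD i 0] = gsRegion curve start (i + 1) :=
          gsRegion_snoc curve start i hs hil
        have hslice : PySem.List.slice curve (some (start : Int)) (some ((i : Int) + 1))
            = gsRegion curve start (i + 1) := by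
          rw [slice_nat]; rfl
        cases desc with
        | true =>
            rw [gsLoopA_step_true curve n i _ seq hi]
            conv_rhs => rw [gsBreaks_step_true curve n i [] hi]
            by_cases hc : curve.getD (i + 1) 0 > curve.getD i 0
            · rw [if_pos hc, if_pos hc, hr,
                show ([] : List Int) = gsRegion curve (i + 1) (i + 1) from (gsRegion_nil curve (i + 1)).symm,
                ih (i + 1) false (i + 1) (seq ++ [gsRegion curve start (i + 1)]) (by omega) (le_refl _),
                List.nil_append, gsBreaks_acc curve n k (i + 1) false [i] (by omega)]
              simp [gsSlices, hslice]
            · rw [if_neg hc, if_neg hc, hr]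
              exact ih (i + 1) true start seq (by omega) (by omega)
        | false =>
            rw [gsLoopA_step_false curve n i _ seq hi]
            conv_rhs => rw [gsBreaks_step_false curve n i [] hi]
            by_cases hc : curve.getD (i + 1) 0 < curve.getD i 0
            · rw [if_pos hc, if_pos hc, hr,
                show ([] : List Int) = gsRegion curve (i + 1) (i + 1) from (gsRegion_nil curve (i + 1)).symm,
                ih (i + 1) true (i + 1) (seq ++ [gsRegion curve start (i + 1)]) (by omega) (le_refl _),
                List.nil_append, gsBreaks_acc curve n k (i + 1) true [i] (by omega)]
              simp [gsSlices, hslice]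
            · rw [if_neg hc, if_neg hc, hr]
              exact ih (i + 1) false start seq (by omega) (by omega)
      · rw [gsLoopA_stop curve n i desc _ seq hi, gsBreaks_stop curve n i desc [] hi]
        simp [gsSlices]

-- ===== VERDICT (by name: the statement is the Claim_ definition above) =====
theorem get_sequence_spec : Claim_equal_get_sequence := by
  intro curve _ _
  unfold Spec_get_sequence get_sequence get_sequence_alt
  have h := loopA_eq curve (curve.length - 1) (by omega)
    (curve.length - 1) 0 (decide (curve.getD 1 0 < curve.getD 0 0)) 0 [] (by omega) (le_refl 0)
  simpa [gsRegion] using h
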